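-- pv_equiv track=rewrite | github.com/jbrodovsky/research | process_dataset.py | find_periods
-- ===== SOURCE A (Python) =====
-- def find_periods(mask) -> list:
--     """
--     Find the start and stop indecies from a boolean mask.
--     """
--     # Calculate the starting and ending indices for each period
--     periods = []
--     start_index = None
--
--     for idx, is_true in enumerate(mask):
--         if not is_true and start_index is None:
--             start_index = idx
--         elif is_true and start_index is not None:
--             end_index = idx - 1
--             periods.append((start_index, end_index))
--             start_index = None
--
--     # If the last period extends until the end of the mask, add it
--     if start_index is not None:
--         end_index = len(mask) - 1
--         periods.append((start_index, end_index))
--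
--     return periods
-- ===== SOURCE B (Python) =====
-- def find_periods(mask) -> list:
--     """
--     Find the start and stop indices from a boolean mask.
--     Two passes: collect False indices, then group maximal consecutive runs.
--     """
--     idxs = [i for i, v in enumerate(mask) if not v]
--     periods = []
--     run_start = None
--     prev = None
--     for i in idxs:
--         if run_start is None:
--             run_start = i
--         elif i != prev + 1:
--             periods.append((run_start, prev))
--             run_start = i
--         prev = i
--     if run_start is not None:
--         periods.append((run_start, prev))
--     return periods
-- ===== Notes on version B (the rewrite author's own statement) =====
-- stated objective: alternative
-- what changed: Replaces A's single stateful toggle loop (start_index set/cleared on False/True transitions) with a two-pass scheme: collect all False indices, then group maximal runs of consecutive indices, flushing a run at each gap and at the end.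
import Mathlib
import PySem

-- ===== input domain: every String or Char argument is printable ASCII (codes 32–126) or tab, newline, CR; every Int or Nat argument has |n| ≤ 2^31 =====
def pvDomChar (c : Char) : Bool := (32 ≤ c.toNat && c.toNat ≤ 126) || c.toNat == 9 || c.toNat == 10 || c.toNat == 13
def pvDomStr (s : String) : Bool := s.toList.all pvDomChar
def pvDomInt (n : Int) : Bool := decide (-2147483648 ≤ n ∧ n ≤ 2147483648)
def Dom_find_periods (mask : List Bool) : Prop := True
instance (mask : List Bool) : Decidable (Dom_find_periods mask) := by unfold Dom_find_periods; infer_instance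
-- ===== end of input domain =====

-- B replaces A's start_index toggle loop by a two-pass scheme (collect False
-- indices, then group maximal consecutive runs); alternative decomposition, same cost.

-- ===== PORT A =====
-- loop body of A: state (periods, start_index)
def fpA_step (st : List (Int × Int) × Option Int) (p : Int × Bool) :
    List (Int × Int) × Option Int :=
  if p.2 = false ∧ st.2 = none then (st.1, some p.1)
  else if p.2 = true ∧ st.2 ≠ none then (st.1 ++ [(st.2.getD 0, p.1 - 1)], none)
  else st

def find_periods (mask : List Bool) : List (Int × Int) :=
  let st := (PySem.List.enumerate mask).foldl fpA_step ([], none)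
  match st.2 with
  | some v => st.1 ++ [(v, (mask.length : Int) - 1)]
  | none => st.1

-- ===== PORT B =====
-- loop body of B: state (periods, run_start, prev)
def fpB_step (st : List (Int × Int) × Option Int × Option Int) (i : Int) :
    List (Int × Int) × Option Int × Option Int :=
  match st.2.1 with
  | none => (st.1, some i, some i)
  | some r =>
    if i ≠ st.2.2.getD 0 + 1 then (st.1 ++ [(r, st.2.2.getD 0)], some i, some i)
    else (st.1, some r, some i)

def find_periods_alt (mask : List Bool) : List (Int × Int) :=
  let idxs := (PySem.List.enumerate mask).filterMap (fun p => if p.2 then none else some p.1)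
  let st := idxs.foldl fpB_step ([], none, none)
  match st.2.1, st.2.2 with
  | some r, some p => st.1 ++ [(r, p)]
  | _, _ => st.1

-- ===== PRECONDITION & SPEC =====
def Spec_find_periods (mask : List Bool) (out : List (Int × Int)) : Prop := out = find_periods_alt mask
instance (mask : List Bool) (out : List (Int × Int)) : Decidable (Spec_find_periods mask out) := by unfold Spec_find_periods; infer_instance

-- ===== CLAIM (what is proved, stated in full; the proofs are below) =====
def Claim_equal_find_periods : Prop := ∀ (mask : List Bool), Dom_find_periods mask → Spec_find_periods mask (find_periods mask)

-- ===== LEMMAS AND PROOFS =====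

-- recursive form of A's loop, with the final flush folded in
def runA (i : Int) (rest : List Bool) (P : List (Int × Int)) (s : Option Int) :
    List (Int × Int) :=
  match rest with
  | [] => match s with | some v => P ++ [(v, i - 1)] | none => P
  | b :: r =>
    if b = false ∧ s = none then runA (i + 1) r P (some i)
    else if b = true ∧ s ≠ none then runA (i + 1) r (P ++ [(s.getD 0, i - 1)]) none
    else runA (i + 1) r P s

-- the False-index list starting offset i
def fidx (i : Int) (rest : List Bool) : List Int :=
  match rest with
  | [] => []
  | b :: r => if b then fidx (i + 1) r else i :: fidx (i + 1) r

-- recursive form of B's loop, with the final flush folded in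
def runB (idxs : List Int) (P : List (Int × Int)) (rs pv : Option Int) :
    List (Int × Int) :=
  match idxs with
  | [] => match rs, pv with | some r, some p => P ++ [(r, p)] | _, _ => P
  | j :: rest =>
    match rs with
    | none => runB rest P (some j) (some j)
    | some r =>
      if j ≠ pv.getD 0 + 1 then runB rest (P ++ [(r, pv.getD 0)]) (some j) (some j)
      else runB rest P (some r) (some j)

lemma portA_eq (rest : List Bool) : ∀ (i : Int) (P : List (Int × Int)) (s : Option Int),
    (match ((PySem.List.enumerate rest i).foldl fpA_step (P, s)).2 with
     | some v => ((PySem.List.enumerate rest i).foldl fpA_step (P, s)).1 ++ [(v, i + (rest.length : Int) - 1)]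
     | none => ((PySem.List.enumerate rest i).foldl fpA_step (P, s)).1)
    = runA i rest P s := by
  induction rest with
  | nil => intro i P s; cases s <;> simp [runA]
  | cons b r ih =>
    intro i P s
    have harith : i + ((b :: r).length : Int) - 1 = (i + 1) + (r.length : Int) - 1 := by
      simp [List.length_cons]; ring
    rw [PySem.List.enumerate_cons, List.foldl_cons, harith]
    show (match ((PySem.List.enumerate r (i+1)).foldl fpA_step (fpA_step (P, s) (i, b))).2 with
     | some v => ((PySem.List.enumerate r (i+1)).foldl fpA_step (fpA_step (P, s) (i, b))).1 ++ [(v, (i+1) + (r.length : Int) - 1)]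
     | none => ((PySem.List.enumerate r (i+1)).foldl fpA_step (fpA_step (P, s) (i, b))).1)
     = runA i (b :: r) P s
    cases b <;> cases s <;>
      simp [fpA_step, runA, ih]

lemma fidx_eq (rest : List Bool) : ∀ (i : Int),
    (PySem.List.enumerate rest i).filterMap (fun p => if p.2 then none else some p.1) = fidx i rest := by
  induction rest with
  | nil => intro i; simp [fidx]
  | cons b r ih =>
    intro i
    rw [PySem.List.enumerate_cons, List.filterMap_cons]
    cases b <;> simp [fidx, ih]

lemma portB_eq (idxs : List Int) : ∀ (P : List (Int × Int)) (rs pv : Option Int),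
    (match (idxs.foldl fpB_step (P, rs, pv)).2.1, (idxs.foldl fpB_step (P, rs, pv)).2.2 with
     | some r, some p => (idxs.foldl fpB_step (P, rs, pv)).1 ++ [(r, p)]
     | _, _ => (idxs.foldl fpB_step (P, rs, pv)).1)
    = runB idxs P rs pv := by
  induction idxs with
  | nil => intro P rs pv; cases rs <;> cases pv <;> simp [runB]
  | cons j rest ih =>
    intro P rs pv
    rw [List.foldl_cons]
    cases rs with
    | none => simpa [fpB_step, runB] using ih P (some j) (some j)
    | some r =>
      by_cases h : j = pv.getD 0 + 1
      · simpa [fpB_step, runB, h] using ih P (some r) (some j)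
      · simpa [fpB_step, runB, h] using ih (P ++ [(r, pv.getD 0)]) (some j) (some j)

-- the main invariant: A's toggle loop agrees with B's run-grouping loop
lemma main_inv (rest : List Bool) :
    (∀ (i : Int) (P : List (Int × Int)) (s : Int),
      runA i rest P (some s) = runB (fidx i rest) P (some s) (some (i - 1))) ∧
    (∀ (i : Int) (P : List (Int × Int)) (r p : Int), p ≤ i - 2 →
      runA i rest (P ++ [(r, p)]) none = runB (fidx i rest) P (some r) (some p)) ∧
    (∀ (i : Int), runA i rest [] none = runB (fidx i rest) [] none none) := by
  induction rest with
  | nil =>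
    refine ⟨?_, ?_, ?_⟩ <;> intro i <;> simp [runA, fidx, runB]
  | cons b r ih =>
    obtain ⟨iha, ihb, ihc⟩ := ih
    refine ⟨?_, ?_, ?_⟩
    · intro i P s
      cases b with
      | true =>
        -- A flushes (s, i-1); B keeps the run pending
        have := ihb (i + 1) P s (i - 1) (by omega)
        simp [runA, fidx, this]
      | false =>
        -- both extend the current run
        have := iha (i + 1) P s
        have h1 : (i : Int) + 1 - 1 = i := by ring
        simp [runA, fidx, runB, h1] at this ⊢
        simp [this]
    · intro i P r p hp
      cases b with
      | true =>
        have := ihb (i + 1) P r p (by omega)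
        simpa [runA, fidx] using this
      | false =>
        -- new False index i starts a fresh run; B flushes the pending (r, p)
        have := iha (i + 1) (P ++ [(r, p)]) i
        have hne : (i : Int) ≠ p + 1 := by omega
        have h1 : (i : Int) + 1 - 1 = i := by ring
        simp [runA, fidx, runB, hne, h1] at this ⊢
        simp [this]
    · intro i
      cases b with
      | true =>
        simpa [runA, fidx] using ihc (i + 1)
      | false =>
        have := iha (i + 1) [] i
        have h1 : (i : Int) + 1 - 1 = i := by ring
        simp [runA, fidx, runB, h1] at this ⊢
        simp [this]

lemma find_periods_eq_runA (mask : List Bool) :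
    find_periods mask = runA 0 mask [] none := by
  have := portA_eq mask 0 [] none
  simpa [find_periods] using this

lemma find_periods_alt_eq_runB (mask : List Bool) :
    find_periods_alt mask = runB (fidx 0 mask) [] none none := by
  have h1 := fidx_eq mask 0
  have h2 := portB_eq (fidx 0 mask) [] none none
  simp [find_periods_alt, h1]
  exact h2

-- ===== VERDICT (by name: the statement is the Claim_ definition above) =====
theorem find_periods_spec : Claim_equal_find_periods := by
  intro mask _
  show find_periods mask = find_periods_alt mask
  rw [find_periods_eq_runA, find_periods_alt_eq_runB]
  exact (main_inv mask).2.2 0
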